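-- pv_equiv track=rewrite | github.com/courtois-neuromod/actions-template | tests/deploy/utils.py | expr_to_opts
-- ===== SOURCE A (Python) =====
-- def expr_to_opts(expr):
--     opts = []
--     if not expr:
--         return []
--     expr = expr.replace('(', ' ( ').replace(')', ' ) ')
--     for sub_expr in expr.split(' '):
--         if len(sub_expr):
--             if sub_expr in '()':
--                 opts.append(f"-{sub_expr}")
--             else:
--                 opts.append(f"--{sub_expr}")
--     return opts
-- ===== SOURCE B (Python) =====
-- def expr_to_opts(expr):
--     # Single-pass character scanner instead of replace+split+classify.
--     if not expr:
--         return []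
--     opts = []
--     buf = ''
--     for c in expr:
--         if c == '(' or c == ')':
--             if buf:
--                 opts.append('--' + buf)
--                 buf = ''
--             opts.append('-' + c)
--         elif c == ' ':
--             if buf:
--                 opts.append('--' + buf)
--                 buf = ''
--         else:
--             buf += c
--     if buf:
--         opts.append('--' + buf)
--     return opts
-- ===== Notes on version B (the rewrite author's own statement) =====
-- stated objective: alternative
-- what changed: Replaced A's three-pass pipeline (replace parens with padded parens, split the whole string on ' ', classify each token) by a single-pass character scanner with a word buffer that flushes on '(', ')' and ' '.
import Mathlib
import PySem

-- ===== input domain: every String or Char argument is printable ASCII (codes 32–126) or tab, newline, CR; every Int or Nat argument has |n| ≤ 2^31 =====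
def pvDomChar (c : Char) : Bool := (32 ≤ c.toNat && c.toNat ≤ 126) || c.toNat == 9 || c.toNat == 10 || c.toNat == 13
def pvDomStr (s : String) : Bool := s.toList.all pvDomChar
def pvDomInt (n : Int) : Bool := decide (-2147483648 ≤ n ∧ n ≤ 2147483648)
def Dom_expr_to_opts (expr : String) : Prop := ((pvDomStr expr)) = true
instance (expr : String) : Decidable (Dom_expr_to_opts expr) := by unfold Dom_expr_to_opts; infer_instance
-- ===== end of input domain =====

-- B is a single-pass character scanner (buffer + flush) instead of A's replace-parens / split-on-space / classify pipeline; same output.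

-- ===== PORT A =====
-- A: replace '(' -> ' ( ', ')' -> ' ) ', split on ' ', classify each nonempty token.
def expr_to_opts (expr : String) : List String :=
  if expr.toList = [] then []
  else
    (PySem.Chars.splitOn
        (PySem.Chars.replace (PySem.Chars.replace expr.toList ['('] [' ', '(', ' ']) [')'] [' ', ')', ' '])
        [' ']).foldl
      (fun opts sub =>
        if sub.length ≠ 0 then
          opts ++ [if PySem.Chars.isIn sub ['(', ')'] then String.ofList ('-' :: sub)
                   else String.ofList ('-' :: '-' :: sub)]
        else opts) []

-- ===== PORT B =====
-- B's flush of the word buffer: nonempty buffers become a "--word" option.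
def scanFlush (buf : List Char) : List String :=
  if buf = [] then [] else [String.ofList ('-' :: '-' :: buf)]

-- B's scanner loop: flush at '(' / ')' / ' ', otherwise extend the buffer.
def scanGo : List Char → List Char → List String → List String
  | [], buf, out => out ++ scanFlush buf
  | c :: t, buf, out =>
    if c = '(' then scanGo t [] (out ++ scanFlush buf ++ ["-("])
    else if c = ')' then scanGo t [] (out ++ scanFlush buf ++ ["-)"])
    else if c = ' ' then scanGo t [] (out ++ scanFlush buf)
    else scanGo t (buf ++ [c]) out

def expr_to_opts_alt (expr : String) : List String :=
  if expr.toList = [] then [] else scanGo expr.toList [] []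

-- ===== PRECONDITION & SPEC =====
def Spec_expr_to_opts (expr : String) (out : List String) : Prop := out = expr_to_opts_alt expr
instance (expr : String) (out : List String) : Decidable (Spec_expr_to_opts expr out) := by unfold Spec_expr_to_opts; infer_instance

-- ===== CLAIM (what is proved, stated in full; the proofs are below) =====
def Claim_equal_expr_to_opts : Prop := ∀ (expr : String), Dom_expr_to_opts expr → Spec_expr_to_opts expr (expr_to_opts expr)

-- ===== LEMMAS AND PROOFS =====

-- the per-character expansion performed by A's two replaces
def expand (c : Char) : List Char :=
  if c = '(' then [' ', '(', ' '] else if c = ')' then [' ', ')', ' '] else [c]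

-- pure split-on-space with a reversed current-word accumulator (mirrors splitOn.go)
def wsplit : List Char → List Char → List (List Char)
  | [], cur => [cur.reverse]
  | c :: t, cur => if c = ' ' then cur.reverse :: wsplit t [] else wsplit t (c :: cur)

-- A's classification of one token
def classify (sub : List Char) : String :=
  if PySem.Chars.isIn sub ['(', ')'] then String.ofList ('-' :: sub)
  else String.ofList ('-' :: '-' :: sub)

def tokensToOpts (ts : List (List Char)) : List String :=
  ts.filterMap (fun sub => if sub.length ≠ 0 then some (classify sub) else none)

-- replacing a single character is flatMap of a pointwise expansion
theorem replace_go_single (o : Char) (new : List Char) :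
    ∀ (fuel : Nat) (l acc : List Char), l.length ≤ fuel →
      PySem.Chars.replace.go [o] new fuel l acc
        = acc.reverse ++ l.flatMap (fun c => if c = o then new else [c]) := by
  intro fuel
  induction fuel with
  | zero =>
    intro l acc h
    have : l = [] := List.eq_nil_of_length_eq_zero (Nat.le_zero.mp h)
    subst this
    rw [PySem.Chars.replace.go.eq_def]; simp
  | succ n ih =>
    intro l acc h
    cases l with
    | nil => rw [PySem.Chars.replace.go.eq_def]; simp
    | cons c t =>
      rw [PySem.Chars.replace.go.eq_def]
      dsimp only
      have hlen : t.length ≤ n := by simpa using h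
      by_cases hc : c = o
      · subst hc
        rw [if_pos (by simp [List.isPrefixOf])]
        rw [show List.drop [c].length (c :: t) = t from rfl, ih t _ hlen]
        simp
      · rw [if_neg (by simp [List.isPrefixOf, beq_false_of_ne (Ne.symm hc)])]
        rw [ih t _ hlen]
        simp [hc]

theorem replace_single (o : Char) (new l : List Char) :
    PySem.Chars.replace l [o] new = l.flatMap (fun c => if c = o then new else [c]) := by
  unfold PySem.Chars.replace
  rw [if_neg (by simp)]
  simpa using replace_go_single o new l.length l [] (le_refl _)

-- A's two replaces compose into one flatMap of `expand`
theorem double_replace (l : List Char) :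
    PySem.Chars.replace (PySem.Chars.replace l ['('] [' ', '(', ' ']) [')'] [' ', ')', ' ']
      = l.flatMap expand := by
  rw [replace_single, replace_single, List.flatMap_assoc]
  congr 1
  funext c
  by_cases h1 : c = '('
  · subst h1; rfl
  · by_cases h2 : c = ')'
    · subst h2; rfl
    · simp [h1, h2, expand]

-- splitOn by a single space computes wsplit
theorem splitOn_go_space :
    ∀ (fuel : Nat) (l cur : List Char) (acc : List (List Char)), l.length < fuel →
      PySem.Chars.splitOn.go [' '] fuel l cur acc = acc.reverse ++ wsplit l cur := by
  intro fuel
  induction fuel with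
  | zero => intro l cur acc h; omega
  | succ n ih =>
    intro l cur acc h
    cases l with
    | nil => rw [PySem.Chars.splitOn.go.eq_def]; simp [wsplit]
    | cons c t =>
      rw [PySem.Chars.splitOn.go.eq_def]
      dsimp only
      have hlen : t.length < n := by simpa using h
      by_cases hc : c = ' '
      · subst hc
        rw [if_pos (by simp [List.isPrefixOf])]
        rw [show List.drop [' '].length (' ' :: t) = t from rfl, ih t [] _ hlen]
        simp [wsplit]
      · rw [if_neg (by simp [List.isPrefixOf, beq_false_of_ne (Ne.symm hc)])]
        rw [ih t (c :: cur) acc hlen]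
        simp [wsplit, hc]

theorem splitOn_space (l : List Char) :
    PySem.Chars.splitOn l [' '] = wsplit l [] := by
  unfold PySem.Chars.splitOn
  simpa using splitOn_go_space (l.length + 1) l [] [] (Nat.lt_succ_self _)

-- A's foldl over tokens is tokensToOpts
theorem foldl_tokens (ts : List (List Char)) (init : List String) :
    ts.foldl
      (fun opts sub =>
        if sub.length ≠ 0 then
          opts ++ [if PySem.Chars.isIn sub ['(', ')'] then String.ofList ('-' :: sub)
                   else String.ofList ('-' :: '-' :: sub)]
        else opts) init = init ++ tokensToOpts ts := by
  induction ts generalizing init with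
  | nil => simp [tokensToOpts]
  | cons a t ih =>
    simp only [List.foldl_cons]
    rw [tokensToOpts, List.filterMap_cons]
    by_cases ha : a.length ≠ 0
    · rw [if_pos ha, if_pos ha, ih]
      simp [tokensToOpts, classify]
    · rw [if_neg ha, if_neg ha, ih]
      simp [tokensToOpts]

-- a word the scanner buffered contains no '(' / ')' so A classifies it "--word"
theorem classify_plain (buf : List Char) (hne : buf ≠ [])
    (hb : ∀ c ∈ buf, c ≠ '(' ∧ c ≠ ')') :
    classify buf = String.ofList ('-' :: '-' :: buf) := by
  unfold classify
  rw [if_neg]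
  intro h
  have hinf : buf <:+: ['(', ')'] := (PySem.Chars.isIn_iff_infix buf _).mp h
  obtain ⟨c, hc⟩ := List.exists_mem_of_ne_nil buf hne
  have := hinf.subset hc
  simp at this
  rcases this with h1 | h1
  · exact (hb c hc).1 h1
  · exact (hb c hc).2 h1

theorem tokensToOpts_cons (a : List Char) (ts : List (List Char)) :
    tokensToOpts (a :: ts)
      = (if a = [] then [] else [classify a]) ++ tokensToOpts ts := by
  by_cases ha : a = []
  · simp [tokensToOpts, ha]
  · simp [tokensToOpts, ha, List.length_eq_zero_iff]

-- flushing = tokenising the buffered word (scanner words carry no '(' ')' )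
theorem flush_eq (buf : List Char) (hb : ∀ c ∈ buf, c ≠ '(' ∧ c ≠ ')' ∧ c ≠ ' ') :
    scanFlush buf = (if buf = [] then [] else [classify buf]) := by
  by_cases h : buf = []
  · simp [h, scanFlush]
  · rw [if_neg h, classify_plain buf h (fun c hc => ⟨(hb c hc).1, (hb c hc).2.1⟩)]
    simp [scanFlush, h]

-- main invariant: the scanner equals A's split-then-classify of the expanded text
theorem scan_eq (cs : List Char) :
    ∀ (buf : List Char) (out : List String),
      (∀ c ∈ buf, c ≠ '(' ∧ c ≠ ')' ∧ c ≠ ' ') →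
      scanGo cs buf out = out ++ tokensToOpts (wsplit (cs.flatMap expand) buf.reverse) := by
  induction cs with
  | nil =>
    intro buf out hb
    rw [show scanGo [] buf out = out ++ scanFlush buf from rfl, flush_eq buf hb]
    rw [show (([] : List Char).flatMap expand) = [] from rfl,
      show wsplit [] buf.reverse = [buf.reverse.reverse] from rfl,
      List.reverse_reverse, tokensToOpts_cons]
    simp [tokensToOpts]
  | cons c t ih =>
    intro buf out hb
    by_cases h1 : c = '('
    · subst h1
      rw [show scanGo ('(' :: t) buf out = scanGo t [] (out ++ scanFlush buf ++ ["-("]) from rfl]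
      rw [ih [] _ (by simp), flush_eq buf hb]
      rw [show ('(' :: t).flatMap expand = ' ' :: '(' :: ' ' :: t.flatMap expand from by
        rw [List.flatMap_cons]; rfl]
      rw [show ∀ l, wsplit (' ' :: '(' :: ' ' :: l) buf.reverse
            = buf :: ['('] :: wsplit l [] from fun l => by
        rw [show wsplit (' ' :: '(' :: ' ' :: l) buf.reverse
              = buf.reverse.reverse :: wsplit ('(' :: ' ' :: l) [] from rfl,
           List.reverse_reverse,
           show wsplit ('(' :: ' ' :: l) [] = wsplit (' ' :: l) ['('] from rfl,
           show wsplit (' ' :: l) ['('] = ['('].reverse :: wsplit l [] from rfl]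
        rfl]
      rw [tokensToOpts_cons, tokensToOpts_cons]
      rw [show classify ['('] = "-(" from by decide]
      by_cases h : buf = [] <;> simp [h]
    · by_cases h2 : c = ')'
      · subst h2
        rw [show scanGo (')' :: t) buf out = scanGo t [] (out ++ scanFlush buf ++ ["-)"]) from by
          rw [scanGo]; rw [if_neg (by decide), if_pos rfl]]
        rw [ih [] _ (by simp), flush_eq buf hb]
        rw [show (')' :: t).flatMap expand = ' ' :: ')' :: ' ' :: t.flatMap expand from by
          rw [List.flatMap_cons]; rfl]
        rw [show ∀ l, wsplit (' ' :: ')' :: ' ' :: l) buf.reverse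
              = buf :: [')'] :: wsplit l [] from fun l => by
          rw [show wsplit (' ' :: ')' :: ' ' :: l) buf.reverse
                = buf.reverse.reverse :: wsplit (')' :: ' ' :: l) [] from rfl,
             List.reverse_reverse,
             show wsplit (')' :: ' ' :: l) [] = wsplit (' ' :: l) [')'] from rfl,
             show wsplit (' ' :: l) [')'] = [')'].reverse :: wsplit l [] from rfl]
          rfl]
        rw [tokensToOpts_cons, tokensToOpts_cons]
        rw [show classify [')'] = "-)" from by decide]
        by_cases h : buf = [] <;> simp [h]
      · by_cases h3 : c = ' '
        · subst h3
          rw [show scanGo (' ' :: t) buf out = scanGo t [] (out ++ scanFlush buf) from by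
            rw [scanGo]; rw [if_neg (by decide), if_neg (by decide), if_pos rfl]]
          rw [ih [] _ (by simp), flush_eq buf hb]
          rw [show (' ' :: t).flatMap expand = ' ' :: t.flatMap expand from by
            rw [List.flatMap_cons]; rfl]
          rw [show wsplit (' ' :: t.flatMap expand) buf.reverse
                = buf.reverse.reverse :: wsplit (t.flatMap expand) [] from rfl,
             List.reverse_reverse, tokensToOpts_cons]
          by_cases h : buf = [] <;> simp [h]
        · rw [show scanGo (c :: t) buf out = scanGo t (buf ++ [c]) out from by
            rw [scanGo]; rw [if_neg h1, if_neg h2, if_neg h3]]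
          rw [ih (buf ++ [c]) out (by
            intro d hd
            rcases List.mem_append.mp hd with hd | hd
            · exact hb d hd
            · simp at hd; subst hd; exact ⟨h1, h2, h3⟩)]
          rw [show (c :: t).flatMap expand = c :: t.flatMap expand from by
            rw [List.flatMap_cons]; simp [expand, h1, h2]]
          rw [show wsplit (c :: t.flatMap expand) buf.reverse
                = wsplit (t.flatMap expand) (c :: buf.reverse) from by
            rw [wsplit]; rw [if_neg h3]]
          simp

-- ===== VERDICT (by name: the statement is the Claim_ definition above) =====
theorem expr_to_opts_spec : Claim_equal_expr_to_opts := by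
  intro expr _
  unfold Spec_expr_to_opts expr_to_opts expr_to_opts_alt
  by_cases h : expr.toList = []
  · simp [h]
  · rw [if_neg h, if_neg h, double_replace, splitOn_space, foldl_tokens,
      scan_eq expr.toList [] [] (by simp)]
    simp
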